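-- pv_equiv track=rewrite | github.com/AdamCisar/VoiceAssistant | assistant/internalCommands/internalCommands.py | correctMisrecognitions
-- ===== SOURCE A (Python) =====
-- def correctMisrecognitions(text):
--     correctionDict = {
--         "serge": {"correction": "search", "is_first_word": True},
--         "surge": {"correction": "search", "is_first_word": True},
--         "blade": {"correction": "play", "is_first_word": True},
--     }
--
--     if text == '':
--         return text
--
--     words = text.split()
--     corrected_words = []
--     for index, word in enumerate(words):
--         isWordFirst = correctionDict.get(word, {}).get("is_first_word", False)
--         correctedWord = correctionDict.get(word, {}).get("correction", word)
--
--         if index == 0 and isWordFirst: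
--             corrected_words.append(correctedWord)
--         elif not isWordFirst:
--             corrected_words.append(correctedWord)
--         else:
--             corrected_words.append(word)
--
--     return ' '.join(corrected_words)
-- ===== SOURCE B (Python) =====
-- def correctMisrecognitions(text):
--     corrections = {"serge": "search", "surge": "search", "blade": "play"}
--     words = text.split()
--     if not words:
--         return ''
--     words[0] = corrections.get(words[0], words[0])
--     return ' '.join(words)
-- ===== Notes on version B (the rewrite author's own statement) =====
-- stated objective: simpler
-- what changed: Every dictionary entry is first-word-only, so B flattens the dict to word->correction, corrects only words[0] and joins, dropping the enumerate loop, the per-word branching and the empty-string guard.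
import Mathlib
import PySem

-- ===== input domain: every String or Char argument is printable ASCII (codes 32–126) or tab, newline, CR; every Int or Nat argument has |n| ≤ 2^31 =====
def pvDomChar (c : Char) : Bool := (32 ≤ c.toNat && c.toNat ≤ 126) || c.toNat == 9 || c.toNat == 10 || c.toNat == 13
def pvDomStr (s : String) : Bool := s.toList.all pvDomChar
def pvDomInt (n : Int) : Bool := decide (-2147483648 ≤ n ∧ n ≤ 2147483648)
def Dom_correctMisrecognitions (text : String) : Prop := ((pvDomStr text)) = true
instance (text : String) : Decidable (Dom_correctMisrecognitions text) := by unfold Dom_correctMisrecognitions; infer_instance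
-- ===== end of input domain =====

-- B corrects only the first word via a flat word→correction dict (all entries are
-- first-word-only), dropping A's enumerate loop, per-word branching and '' guard.

-- ===== PORT A =====
-- the nested dict, as word ↦ (correction, is_first_word)
def pvCorrectionDictA : PySem.Dict String (String × Bool) :=
  PySem.Dict.ofList [("serge", ("search", true)), ("surge", ("search", true)), ("blade", ("play", true))]

def correctMisrecognitions (text : String) : String :=
  if text == "" then text
  else
    let words := PySem.Str.split₀ text
    let corrected_words := (PySem.List.enumerate words).foldl (fun acc iw =>
      let index := iw.1
      let word := iw.2
      let isWordFirst := ((pvCorrectionDictA.get? word).map Prod.snd).getD false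
      let correctedWord := ((pvCorrectionDictA.get? word).map Prod.fst).getD word
      if index == 0 && isWordFirst then acc ++ [correctedWord]
      else if !isWordFirst then acc ++ [correctedWord]
      else acc ++ [word]) []
    PySem.Str.join " " corrected_words

-- ===== PORT B =====
def pvCorrectionsB : PySem.Dict String String :=
  PySem.Dict.ofList [("serge", "search"), ("surge", "search"), ("blade", "play")]

def correctMisrecognitions_alt (text : String) : String :=
  match PySem.Str.split₀ text with
  | [] => ""
  | w :: ws => PySem.Str.join " " (pvCorrectionsB.getD w w :: ws)

-- ===== PRECONDITION & SPEC =====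
def Spec_correctMisrecognitions (text : String) (out : String) : Prop := out = correctMisrecognitions_alt text
instance (text : String) (out : String) : Decidable (Spec_correctMisrecognitions text out) := by unfold Spec_correctMisrecognitions; infer_instance

-- ===== CLAIM (what is proved, stated in full; the proofs are below) =====
def Claim_equal_correctMisrecognitions : Prop := ∀ (text : String), Dom_correctMisrecognitions text → Spec_correctMisrecognitions text (correctMisrecognitions text)


-- ===== LEMMAS AND PROOFS =====

-- the two literal dicts, in constructor form
theorem pvDictA_eq : pvCorrectionDictA =
    PySem.Dict.mk [("serge", ("search", true)), ("surge", ("search", true)), ("blade", ("play", true))] := by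
  decide

theorem pvDictB_eq : pvCorrectionsB =
    PySem.Dict.mk [("serge", "search"), ("surge", "search"), ("blade", "play")] := by
  decide

-- every entry of the nested dict has is_first_word = true
theorem pvDictA_snd_true (w : String) (p : String × Bool)
    (h : pvCorrectionDictA.get? w = some p) : p.2 = true := by
  rw [pvDictA_eq] at h
  rw [PySem.Dict.get?_mk_cons] at h
  split at h
  · cases h; rfl
  · rw [PySem.Dict.get?_mk_cons] at h
    split at h
    · cases h; rfl
    · rw [PySem.Dict.get?_mk_cons] at h
      split at h
      · cases h; rfl
      · simp [PySem.Dict.get?] at h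

-- A's loop body, beta/zeta-reduced (proof-side name for the fold function)
def pvBodyA (acc : List String) (iw : Int × String) : List String :=
  if (iw.1 == 0 && (Option.map Prod.snd (pvCorrectionDictA.get? iw.2)).getD false) = true then
    acc ++ [(Option.map Prod.fst (pvCorrectionDictA.get? iw.2)).getD iw.2]
  else
    if (!(Option.map Prod.snd (pvCorrectionDictA.get? iw.2)).getD false) = true then
      acc ++ [(Option.map Prod.fst (pvCorrectionDictA.get? iw.2)).getD iw.2]
    else acc ++ [iw.2]

-- at a nonzero index the loop body leaves the word unchanged
theorem pvBodyA_ne_zero (acc : List String) (s : Int) (w : String) (hs : s ≠ 0) :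
    pvBodyA acc (s, w) = acc ++ [w] := by
  unfold pvBodyA
  have h0 : ((s, w).1 == (0 : Int)) = false := by simpa using hs
  rw [h0]
  simp only [Bool.false_and, Bool.false_eq_true, if_false]
  cases hget : pvCorrectionDictA.get? w with
  | none => simp
  | some p =>
    have := pvDictA_snd_true w p hget
    simp [this]

-- the tail of the fold appends the words unchanged
theorem pvTail_foldl (ws : List String) (s : Int) (hs : 1 ≤ s) (acc : List String) :
    (PySem.List.enumerate ws s).foldl pvBodyA acc = acc ++ ws := by
  induction ws generalizing s acc with
  | nil => simp [PySem.List.enumerate_nil]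
  | cons w ws ih =>
    rw [PySem.List.enumerate_cons, List.foldl_cons, pvBodyA_ne_zero acc s w (by omega),
      ih (s + 1) (by omega), List.append_assoc]
    rfl

-- B's flat lookup agrees with A's treatment of the first word
theorem pvHead_eq (w : String) : pvBodyA [] (0, w) = [pvCorrectionsB.getD w w] := by
  by_cases h1 : w = "serge"
  · subst h1; decide
  by_cases h2 : w = "surge"
  · subst h2; decide
  by_cases h3 : w = "blade"
  · subst h3; decide
  have hA : pvCorrectionDictA.get? w = none := by
    rw [pvDictA_eq]
    rw [PySem.Dict.get?_mk_cons]; rw [if_neg (by simpa using Ne.symm h1)]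
    rw [PySem.Dict.get?_mk_cons]; rw [if_neg (by simpa using Ne.symm h2)]
    rw [PySem.Dict.get?_mk_cons]; rw [if_neg (by simpa using Ne.symm h3)]
    simp [PySem.Dict.get?]
  have hB : pvCorrectionsB.getD w w = w := by
    rw [PySem.Dict.getD, pvDictB_eq]
    rw [PySem.Dict.get?_mk_cons]; rw [if_neg (by simpa using Ne.symm h1)]
    rw [PySem.Dict.get?_mk_cons]; rw [if_neg (by simpa using Ne.symm h2)]
    rw [PySem.Dict.get?_mk_cons]; rw [if_neg (by simpa using Ne.symm h3)]
    simp [PySem.Dict.get?]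
  simp [pvBodyA, hA, hB]

-- ===== VERDICT (by name: the statement is the Claim_ definition above) =====
theorem correctMisrecognitions_spec : Claim_equal_correctMisrecognitions := by
  intro text _
  unfold Spec_correctMisrecognitions correctMisrecognitions correctMisrecognitions_alt
  by_cases hempty : text = ""
  · subst hempty; decide
  · rw [if_neg (by simpa using hempty)]
    cases hsplit : PySem.Str.split₀ text with
    | nil => simp [PySem.List.enumerate_nil, PySem.Str.join]
    | cons w ws =>
      simp only [hsplit]
      have hfun : (fun (acc : List String) (iw : Int × String) =>
          let index := iw.1
          let word := iw.2
          let isWordFirst := ((pvCorrectionDictA.get? word).map Prod.snd).getD false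
          let correctedWord := ((pvCorrectionDictA.get? word).map Prod.fst).getD word
          if index == 0 && isWordFirst then acc ++ [correctedWord]
          else if !isWordFirst then acc ++ [correctedWord]
          else acc ++ [word]) = pvBodyA := by
        funext acc iw; rfl
      rw [hfun, PySem.List.enumerate_cons, List.foldl_cons, pvHead_eq w,
        pvTail_foldl ws (0 + 1) (by omega)]
      rfl
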